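-- pv_equiv track=rewrite | github.com/zshuaeva/80Problems | solutions/solution_046.py | make_sentences
-- ===== SOURCE A (Python) =====
-- def make_sentences(subjects, verbs, objects):
--     sentences = []                                      # solution
--     for subject in subjects:                            # solution
--         for verb in verbs:                              # solution
--             for object in objects:                      # solution
--                 sentence = subject + " " + verb + " " + object      # solution
--                 sentences.append(sentence)              # solution
--     return sentences                                    # solution
-- ===== SOURCE B (Python) =====
-- def _obj_part(prefix, objects):
--     if not objects:
--         return []
--     return [prefix + " " + objects[0]] + _obj_part(prefix, objects[1:])
--
-- def _verb_part(subject, verbs, objects):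
--     if not verbs:
--         return []
--     return _obj_part(subject + " " + verbs[0], objects) + _verb_part(subject, verbs[1:], objects)
--
-- def make_sentences(subjects, verbs, objects):
--     if not subjects:
--         return []
--     return _verb_part(subjects[0], verbs, objects) + make_sentences(subjects[1:], verbs, objects)
-- ===== Notes on version B (the rewrite author's own statement) =====
-- stated objective: alternative
-- what changed: Replaces the single triple-nested loop with accumulator by a structural recursion: three small recursive functions (on subjects, verbs, objects) that build each block of sentences and concatenate blocks front-to-back.
import Mathlib
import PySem

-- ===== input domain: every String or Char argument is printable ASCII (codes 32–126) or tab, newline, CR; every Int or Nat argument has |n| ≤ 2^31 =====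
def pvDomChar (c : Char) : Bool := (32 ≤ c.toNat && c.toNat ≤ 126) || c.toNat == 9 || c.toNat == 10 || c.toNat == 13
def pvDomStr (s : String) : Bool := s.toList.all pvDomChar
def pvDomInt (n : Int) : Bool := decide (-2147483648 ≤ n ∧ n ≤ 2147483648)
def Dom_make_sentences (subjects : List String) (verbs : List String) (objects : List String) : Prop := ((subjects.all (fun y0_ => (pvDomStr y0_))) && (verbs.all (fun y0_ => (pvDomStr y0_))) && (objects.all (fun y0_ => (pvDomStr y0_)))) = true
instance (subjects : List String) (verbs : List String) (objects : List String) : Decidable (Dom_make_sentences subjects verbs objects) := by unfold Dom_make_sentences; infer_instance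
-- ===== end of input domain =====

-- ===== PORT A =====
-- Header: B replaces A's triple nested loop with accumulator by structural recursion
-- building blocks and concatenating them (alternative decomposition; same cost).
def make_sentences (subjects : List String) (verbs : List String) (objects : List String) : List String :=
  subjects.foldl (fun sentences subject =>
    verbs.foldl (fun sentences verb =>
      objects.foldl (fun sentences object =>
        sentences ++ [subject ++ " " ++ verb ++ " " ++ object]) sentences) sentences) []

-- ===== PORT B =====
def objPart (prefix_ : String) : List String → List String
  | [] => []
  | o :: rest => (prefix_ ++ " " ++ o) :: objPart prefix_ rest

def verbPart (subject : String) (verbs : List String) (objects : List String) : List String :=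
  match verbs with
  | [] => []
  | v :: rest => objPart (subject ++ " " ++ v) objects ++ verbPart subject rest objects

def make_sentences_alt (subjects : List String) (verbs : List String) (objects : List String) : List String :=
  match subjects with
  | [] => []
  | s :: rest => verbPart s verbs objects ++ make_sentences_alt rest verbs objects

-- ===== PRECONDITION & SPEC =====
def Spec_make_sentences (subjects : List String) (verbs : List String) (objects : List String) (out : List String) : Prop := out = make_sentences_alt subjects verbs objects
instance (subjects : List String) (verbs : List String) (objects : List String) (out : List String) : Decidable (Spec_make_sentences subjects verbs objects out) := by unfold Spec_make_sentences; infer_instance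

-- ===== CLAIM (what is proved, stated in full; the proofs are below) =====
def Claim_equal_make_sentences : Prop := ∀ (subjects : List String) (verbs : List String) (objects : List String), Dom_make_sentences subjects verbs objects → Spec_make_sentences subjects verbs objects (make_sentences subjects verbs objects)

-- ===== LEMMAS AND PROOFS =====
theorem flat_A (subjects verbs objects : List String) :
    make_sentences subjects verbs objects
      = subjects.flatMap (fun s => verbs.flatMap (fun v => objects.map (fun o => s ++ " " ++ v ++ " " ++ o))) := by
  unfold make_sentences
  have h : ∀ acc, subjects.foldl (fun sentences subject =>
      verbs.foldl (fun sentences verb =>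
        objects.foldl (fun sentences object =>
          sentences ++ [subject ++ " " ++ verb ++ " " ++ object]) sentences) sentences) acc
    = acc ++ subjects.flatMap (fun s => verbs.flatMap (fun v => objects.map (fun o => s ++ " " ++ v ++ " " ++ o))) := by
    intro acc
    rw [show (fun sentences subject =>
      verbs.foldl (fun sentences verb =>
        objects.foldl (fun sentences object =>
          sentences ++ [subject ++ " " ++ verb ++ " " ++ object]) sentences) sentences)
      = (fun sentences subject => sentences ++ (verbs.flatMap (fun v => objects.map (fun o => subject ++ " " ++ v ++ " " ++ o)))) from ?_,
      PySem.List.foldl_append_eq_flatMap]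
    funext acc' s
    rw [show (fun sentences verb =>
      objects.foldl (fun sentences object =>
        sentences ++ [s ++ " " ++ verb ++ " " ++ object]) sentences)
      = (fun sentences verb => sentences ++ (objects.map (fun o => s ++ " " ++ verb ++ " " ++ o))) from ?_,
      PySem.List.foldl_append_eq_flatMap]
    funext acc'' v
    rw [PySem.List.foldl_append_singleton_eq_map]
  simpa using h []

theorem objPart_eq (p : String) (objects : List String) :
    objPart p objects = objects.map (fun o => p ++ " " ++ o) := by
  induction objects with
  | nil => rfl
  | cons o rest ih => simp [objPart, ih]

theorem verbPart_eq (s : String) (verbs objects : List String) :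
    verbPart s verbs objects
      = verbs.flatMap (fun v => objects.map (fun o => s ++ " " ++ v ++ " " ++ o)) := by
  induction verbs with
  | nil => rfl
  | cons v rest ih => simp [verbPart, ih, objPart_eq, String.append_assoc]

theorem flat_B (subjects verbs objects : List String) :
    make_sentences_alt subjects verbs objects
      = subjects.flatMap (fun s => verbs.flatMap (fun v => objects.map (fun o => s ++ " " ++ v ++ " " ++ o))) := by
  induction subjects with
  | nil => rfl
  | cons s rest ih => simp [make_sentences_alt, ih, verbPart_eq]

-- ===== VERDICT (by name: the statement is the Claim_ definition above) =====
theorem make_sentences_spec : Claim_equal_make_sentences := by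
  intro subjects verbs objects _
  unfold Spec_make_sentences
  rw [flat_A, flat_B]
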